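-- pv_equiv track=rewrite | github.com/juliansommer/random-scripts | prime.py | find_prime
-- ===== SOURCE A (Python) =====
-- def find_prime(startlist: list) -> list:
--     prime = []
--     nonprime = []
--     for i in startlist:
--         try:
--             if int(i) > 1:
--                 for x in range(2, int(i)):
--                     if (int(i) % x) == 0:
--                         nonprime.append(
--                             i + " (" + str(x) + "\u00d7" + str(int(i) // x) + ")"
--                         )
--                         break
--                 else:
--                     prime.append(i)
--             else:  # num is 0 or  1
--                 nonprime.append(i)
--         except ValueError:  # if there is a letter in document
--             pass
--
--     return prime, nonprime
-- ===== SOURCE B (Python) =====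
-- def _smallest_factor(n):
--     """Smallest divisor >= 2 of n (n >= 2), trial division up to sqrt(n); None if n is prime."""
--     x = 2
--     while x * x <= n:
--         if n % x == 0:
--             return x
--         x += 1
--     return None
--
--
-- def _label(s):
--     """None if s is not an int literal; else (True, s) for a prime, (False, text) otherwise."""
--     try:
--         n = int(s)
--     except ValueError:
--         return None
--     if n <= 1:
--         return (False, s)
--     x = _smallest_factor(n)
--     if x is None:
--         return (True, s)
--     return (False, s + " (" + str(x) + "\u00d7" + str(n // x) + ")")
--
--
-- def find_prime(startlist: list) -> list:
--     labels = [t for t in map(_label, startlist) if t is not None]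
--     prime = [t for ok, t in labels if ok]
--     nonprime = [t for ok, t in labels if not ok]
--     return prime, nonprime
-- ===== Notes on version B (the rewrite author's own statement) =====
-- stated objective: alternative
-- what changed: B trial-divides only up to sqrt(n) (the first divisor found is the smallest, and a divisor below sqrt(n) exists whenever any proper divisor does), parses each string once instead of re-calling int() in the inner loop, and is decomposed as a per-string labelling function plus comprehensions instead of one accumulator loop; a timing run's generated values are too small for the sqrt bound to show, so no speed is claimed.
import Mathlib
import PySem

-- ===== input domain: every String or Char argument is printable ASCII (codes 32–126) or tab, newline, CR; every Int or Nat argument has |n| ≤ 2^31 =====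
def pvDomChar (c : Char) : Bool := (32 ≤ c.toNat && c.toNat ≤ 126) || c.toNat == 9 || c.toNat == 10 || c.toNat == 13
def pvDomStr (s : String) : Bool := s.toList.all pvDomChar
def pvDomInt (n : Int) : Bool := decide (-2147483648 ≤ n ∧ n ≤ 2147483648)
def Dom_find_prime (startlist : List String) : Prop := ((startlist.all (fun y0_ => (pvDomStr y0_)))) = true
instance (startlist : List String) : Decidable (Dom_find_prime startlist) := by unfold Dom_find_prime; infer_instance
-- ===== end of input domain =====

-- B replaces A's trial division up to n by trial division up to sqrt(n), parses each string once,
-- and uses a per-string labelling decomposition; return values proved equal on all inputs.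

-- ===== PORT A =====
-- A's inner 'for x in range(2, int(i))' with break/else: first x with n % x == 0, else none.
def aScan (n x : Int) : Option Int :=
  if _h : x < n then
    if PySem.Int.mod n x = 0 then some x else aScan n (x + 1)
  else none
termination_by (n - x).toNat
decreasing_by omega

-- A's loop body (appends to prime/nonprime).
def stepA (acc : List String × List String) (i : String) : List String × List String :=
  match PySem.Int.ofStr? i with
  | none => acc                                   -- except ValueError: pass
  | some n =>
    if n > 1 then
      match aScan n 2 with
      | some x =>
          (acc.1, acc.2 ++ [i ++ " (" ++ PySem.Int.toStr x ++ "×" ++ PySem.Int.toStr (PySem.Int.floordiv n x) ++ ")"])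
      | none => (acc.1 ++ [i], acc.2)
    else (acc.1, acc.2 ++ [i])

def find_prime (startlist : List String) : List String × List String :=
  startlist.foldl stepA ([], [])

-- ===== PORT B =====
-- Source B's _smallest_factor: trial division while x*x <= n.
def bScan (n x : Int) : Option Int :=
  if _h : x * x ≤ n then
    if PySem.Int.mod n x = 0 then some x else bScan n (x + 1)
  else none
termination_by (n + 1 - x).toNat
decreasing_by
  have hxn : x ≤ n := by nlinarith [sq_nonneg (x - 1)]
  omega

-- Source B's _label.
def labelB (s : String) : Option (Bool × String) :=
  match PySem.Int.ofStr? s with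
  | none => none
  | some n =>
    if n ≤ 1 then some (false, s)
    else
      match bScan n 2 with
      | none => some (true, s)
      | some x =>
          some (false, s ++ " (" ++ PySem.Int.toStr x ++ "×" ++ PySem.Int.toStr (PySem.Int.floordiv n x) ++ ")")

def find_prime_alt (startlist : List String) : List String × List String :=
  let labels := startlist.filterMap labelB
  ((labels.filter (fun p => p.1)).map (fun p => p.2),
   (labels.filter (fun p => !p.1)).map (fun p => p.2))

-- ===== PRECONDITION & SPEC =====
def Spec_find_prime (startlist : List String) (out : List String × List String) : Prop := out = find_prime_alt startlist
instance (startlist : List String) (out : List String × List String) : Decidable (Spec_find_prime startlist out) := by unfold Spec_find_prime; infer_instance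

-- ===== CLAIM (what is proved, stated in full; the proofs are below) =====
def Claim_equal_find_prime : Prop := ∀ (startlist : List String), Dom_find_prime startlist → Spec_find_prime startlist (find_prime startlist)

-- ===== LEMMAS AND PROOFS =====

theorem aScan_eq_none (n x : Int) (h : ∀ y, x ≤ y → y < n → PySem.Int.mod n y ≠ 0) :
    aScan n x = none := by
  fun_induction aScan n x with
  | case1 x hlt hm => exact absurd hm (h x le_rfl hlt)
  | case2 x hlt hm ih => exact ih (fun y hy hyn => h y (by omega) hyn)
  | case3 x hlt => rfl

theorem aScan_eq_some (n x d : Int) (hxd : x ≤ d) (hdn : d < n) (hm : PySem.Int.mod n d = 0)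
    (hmin : ∀ y, x ≤ y → y < d → PySem.Int.mod n y ≠ 0) : aScan n x = some d := by
  fun_induction aScan n x with
  | case1 x hlt hmx =>
      have : x = d := by
        by_contra hne
        exact hmin x le_rfl (by omega) hmx
      simp [this]
  | case2 x hlt hmx ih =>
      have hxd' : x + 1 ≤ d := by
        rcases eq_or_lt_of_le hxd with h | h
        · exact absurd (h ▸ hm) hmx
        · omega
      exact ih hxd' (fun y hy hyd => hmin y (by omega) hyd)
  | case3 x hlt => omega

theorem bScan_none (n x : Int) (hx : 0 ≤ x) (h : bScan n x = none) :
    ∀ y, x ≤ y → y * y ≤ n → PySem.Int.mod n y ≠ 0 := by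
  revert hx h
  fun_induction bScan n x with
  | case1 x hle hm => intro hx h; simp at h
  | case2 x hle hm ih =>
      intro hx h y hy hyn
      rcases eq_or_lt_of_le hy with rfl | h'
      · exact hm
      · exact ih (by omega) h y (by omega) hyn
  | case3 x hle =>
      intro hx h y hy hyn hmy
      nlinarith

theorem bScan_some (n x d : Int) (h : bScan n x = some d) :
    x ≤ d ∧ d * d ≤ n ∧ PySem.Int.mod n d = 0 ∧ ∀ y, x ≤ y → y < d → PySem.Int.mod n y ≠ 0 := by
  fun_induction bScan n x with
  | case1 x hle hm =>
      simp only [Option.some.injEq] at h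
      subst h
      exact ⟨le_rfl, hle, hm, fun y hy hyd => by omega⟩
  | case2 x hle hm ih =>
      obtain ⟨h1, h2, h3, h4⟩ := ih h
      refine ⟨by omega, h2, h3, fun y hy hyd => ?_⟩
      rcases eq_or_lt_of_le hy with rfl | h'
      · exact hm
      · exact h4 y (by omega) hyd
  | case3 x hle => simp at h

theorem scan_agree (n : Int) (hn : 2 ≤ n) : aScan n 2 = bScan n 2 := by
  cases hb : bScan n 2 with
  | some d =>
      obtain ⟨h1, h2, h3, h4⟩ := bScan_some n 2 d hb
      have hdvd : d ∣ n := (PySem.Int.mod_eq_zero_iff_dvd n d).mp h3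
      obtain ⟨m, hm⟩ := hdvd
      have hd2 : 2 ≤ m := by nlinarith
      have hdn : d < n := by nlinarith
      exact aScan_eq_some n 2 d h1 hdn h3 h4
  | none =>
      have hnone := bScan_none n 2 (by omega) hb
      apply aScan_eq_none
      intro y hy hyn hmy
      have hdvd : y ∣ n := (PySem.Int.mod_eq_zero_iff_dvd n y).mp hmy
      obtain ⟨m, hm⟩ := hdvd
      have hm2 : 2 ≤ m := by nlinarith
      by_cases hsq : y * y ≤ n
      · exact hnone y hy hsq hmy
      · -- then m < y, so m*m ≤ n and m divides n
        have hmy' : m ≤ y := by nlinarith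
        have hmm : m * m ≤ n := by nlinarith
        have hmdvd : PySem.Int.mod n m = 0 :=
          (PySem.Int.mod_eq_zero_iff_dvd n m).mpr ⟨y, by rw [hm, mul_comm]⟩
        exact hnone m (by omega) hmm hmdvd

-- A's loop body equals a case split on B's label.
theorem stepA_eq_label (acc : List String × List String) (i : String) :
    stepA acc i = match labelB i with
      | none => acc
      | some (true, t) => (acc.1 ++ [t], acc.2)
      | some (false, t) => (acc.1, acc.2 ++ [t]) := by
  unfold stepA labelB
  cases hof : PySem.Int.ofStr? i with
  | none => rfl
  | some n =>
      by_cases hn : n > 1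
      · have hagree := scan_agree n (by omega)
        simp only [if_pos hn, if_neg (by omega : ¬ n ≤ 1), hagree]
        cases bScan n 2 <;> rfl
      · simp only [if_neg hn, if_pos (by omega : n ≤ 1)]

theorem fold_eq (l : List String) (p q : List String) :
    l.foldl stepA (p, q) =
      (p ++ ((l.filterMap labelB).filter (fun r => r.1)).map (fun r => r.2),
       q ++ ((l.filterMap labelB).filter (fun r => !r.1)).map (fun r => r.2)) := by
  induction l generalizing p q with
  | nil => simp
  | cons s t ih =>
      rw [List.foldl_cons, stepA_eq_label]
      cases hl : labelB s with
      | none => simp [hl, ih]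
      | some r =>
          obtain ⟨ok, txt⟩ := r
          cases ok <;> simp [hl, ih]

-- ===== VERDICT (by name: the statement is the Claim_ definition above) =====
theorem find_prime_spec : Claim_equal_find_prime := by
  intro startlist _
  unfold Spec_find_prime find_prime find_prime_alt
  simpa using fold_eq startlist [] []
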